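-- pv_equiv track=rewrite | github.com/shephinphilip/Multi-Agent-Clinical-psychiatrist | clinical_agents.py | _extract_frequency
-- ===== SOURCE A (Python) =====
-- def _extract_frequency(text: str) -> str:
--     """Extract frequency indicators"""
--     if any(word in text for word in ["all the time", "always", "constantly", "every day"]):
--         return "always"
--     elif any(word in text for word in ["most of the time", "usually", "often"]):
--         return "most of the time"
--     elif any(word in text for word in ["sometimes", "occasionally", "once in a while"]):
--         return "sometimes"
--     elif any(word in text for word in ["rarely", "hardly ever", "seldom"]):
--         return "rarely"
--     elif any(word in text for word in ["never", "not at all"]):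
--         return "never"
--     else:
--         return "unspecified"
-- ===== SOURCE B (Python) =====
-- # Flat keyword->priority scan: compute the minimal matching priority over all
-- # keywords in one pass, then map the priority to its label (5 = no match).
-- KEYWORDS = [
--     ("all the time", 0), ("always", 0), ("constantly", 0), ("every day", 0),
--     ("most of the time", 1), ("usually", 1), ("often", 1),
--     ("sometimes", 2), ("occasionally", 2), ("once in a while", 2),
--     ("rarely", 3), ("hardly ever", 3), ("seldom", 3),
--     ("never", 4), ("not at all", 4),
-- ]
-- LABELS = ["always", "most of the time", "sometimes", "rarely", "never", "unspecified"]
--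
-- def _extract_frequency(text: str) -> str:
--     """Extract frequency indicators"""
--     best = 5
--     for kw, p in KEYWORDS:
--         if p < best and kw in text:
--             best = p
--     return LABELS[best]
-- ===== Notes on version B (the rewrite author's own statement) =====
-- stated objective: alternative
-- what changed: Instead of an early-return if/elif chain over keyword groups, B does one pass over a flat keyword->priority table keeping the minimal matching priority as an accumulator and indexes a label array with it at the end.
import Mathlib
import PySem

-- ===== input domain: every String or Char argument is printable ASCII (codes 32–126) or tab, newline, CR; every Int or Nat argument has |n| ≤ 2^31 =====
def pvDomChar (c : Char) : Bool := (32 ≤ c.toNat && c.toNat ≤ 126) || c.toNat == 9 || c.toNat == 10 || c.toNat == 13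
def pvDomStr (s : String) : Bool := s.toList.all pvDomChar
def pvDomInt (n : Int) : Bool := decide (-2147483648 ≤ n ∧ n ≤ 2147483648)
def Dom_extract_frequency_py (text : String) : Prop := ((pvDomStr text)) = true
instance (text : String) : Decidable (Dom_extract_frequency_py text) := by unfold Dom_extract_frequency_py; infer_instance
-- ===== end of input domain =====

-- B replaces A's early-return if/elif chain by a single pass over a flat keyword->priority
-- table keeping the minimal matching priority, then indexing a label array; no speed claim.

-- ===== PORT A =====
-- 'any(word in text for word in kws)' = kws.any (fun w => PySem.Str.isIn w text)
def extract_frequency_py (text : String) : String :=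
  if ["all the time", "always", "constantly", "every day"].any (fun w => PySem.Str.isIn w text) then
    "always"
  else if ["most of the time", "usually", "often"].any (fun w => PySem.Str.isIn w text) then
    "most of the time"
  else if ["sometimes", "occasionally", "once in a while"].any (fun w => PySem.Str.isIn w text) then
    "sometimes"
  else if ["rarely", "hardly ever", "seldom"].any (fun w => PySem.Str.isIn w text) then
    "rarely"
  else if ["never", "not at all"].any (fun w => PySem.Str.isIn w text) then
    "never"
  else
    "unspecified"

-- ===== PORT B =====
def pvKeywords : List (String × Nat) :=
  [ ("all the time", 0), ("always", 0), ("constantly", 0), ("every day", 0),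
    ("most of the time", 1), ("usually", 1), ("often", 1),
    ("sometimes", 2), ("occasionally", 2), ("once in a while", 2),
    ("rarely", 3), ("hardly ever", 3), ("seldom", 3),
    ("never", 4), ("not at all", 4) ]

def pvLabels : List String :=
  ["always", "most of the time", "sometimes", "rarely", "never", "unspecified"]

-- the 'for kw, p in KEYWORDS: if p < best and kw in text: best = p' loop
def pvBest (text : String) : List (String × Nat) → Nat → Nat
  | [], best => best
  | (kw, p) :: rest, best =>
      pvBest text rest (if p < best ∧ PySem.Str.isIn kw text = true then p else best)

-- LABELS[best]; the index is always < 6, so the .getD default is never taken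
def extract_frequency_py_alt (text : String) : String :=
  (PySem.List.pyGet? pvLabels (Int.ofNat (pvBest text pvKeywords 5))).getD ""

-- ===== PRECONDITION & SPEC =====
def Spec_extract_frequency_py (text : String) (out : String) : Prop := out = extract_frequency_py_alt text
instance (text : String) (out : String) : Decidable (Spec_extract_frequency_py text out) := by unfold Spec_extract_frequency_py; infer_instance

-- ===== CLAIM =====
def Claim_equal_extract_frequency_py : Prop := ∀ (text : String), Dom_extract_frequency_py text → Spec_extract_frequency_py text (extract_frequency_py text)

-- ===== LEMMAS AND PROOFS =====

-- processing a whole same-priority group: best drops to p iff some keyword matches and p < best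
theorem pvBest_group (text : String) (p : Nat) (kws : List String) (best : Nat) :
    pvBest text (kws.map (fun k => (k, p))) best
      = if kws.any (fun w => PySem.Str.isIn w text) ∧ p < best then p else best := by
  induction kws generalizing best with
  | nil => simp [pvBest]
  | cons k rest ih =>
      simp only [List.map_cons, pvBest, List.any_cons, Bool.or_eq_true]
      rw [ih]
      split_ifs <;> first | rfl | omega | tauto

theorem pvBest_append (text : String) (l1 l2 : List (String × Nat)) (best : Nat) :
    pvBest text (l1 ++ l2) best = pvBest text l2 (pvBest text l1 best) := by
  induction l1 generalizing best with
  | nil => rfl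
  | cons x rest ih => cases x; simp [pvBest, ih]

-- the flat table, seen as five same-priority groups
theorem pvKeywords_groups :
    pvKeywords
      = (["all the time", "always", "constantly", "every day"].map (fun k => (k, 0)))
        ++ (["most of the time", "usually", "often"].map (fun k => (k, 1)))
        ++ (["sometimes", "occasionally", "once in a while"].map (fun k => (k, 2)))
        ++ (["rarely", "hardly ever", "seldom"].map (fun k => (k, 3)))
        ++ (["never", "not at all"].map (fun k => (k, 4))) := rfl

-- ===== VERDICT =====
theorem extract_frequency_py_spec : Claim_equal_extract_frequency_py := by
  intro text _
  unfold Spec_extract_frequency_py extract_frequency_py extract_frequency_py_alt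
  rw [pvKeywords_groups, pvBest_append, pvBest_append, pvBest_append, pvBest_append,
      pvBest_group, pvBest_group, pvBest_group, pvBest_group, pvBest_group]
  set b0 := ["all the time", "always", "constantly", "every day"].any (fun w => PySem.Str.isIn w text) with hb0
  set b1 := ["most of the time", "usually", "often"].any (fun w => PySem.Str.isIn w text) with hb1
  set b2 := ["sometimes", "occasionally", "once in a while"].any (fun w => PySem.Str.isIn w text) with hb2
  set b3 := ["rarely", "hardly ever", "seldom"].any (fun w => PySem.Str.isIn w text) with hb3
  set b4 := ["never", "not at all"].any (fun w => PySem.Str.isIn w text) with hb4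
  clear hb0 hb1 hb2 hb3 hb4
  cases b0 <;> cases b1 <;> cases b2 <;> cases b3 <;> cases b4 <;> rfl
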